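-- pv_equiv track=rewrite | github.com/mitoclub/nemu-pipeline | scripts/simulate_alignments.py | msa_unmasking
-- ===== SOURCE A (Python) =====
-- from typing import Dict
--
-- def codonify(seq):
--     codons = []
--     for i in range(0, len(seq), 3):
--         codons.append(seq[i: i + 3])
--     return codons
--
-- def seq_unmasking(seq, codons, consensus):
--     if len(consensus) // 3 < max(codons):
--         raise ValueError("codon mask don't fit to sequence")
--
--     seq_cdn = codonify(seq)
--     consensus = codonify(consensus)
--     codons_set = set(codons)
--     unmasked = ''
--     var_cdn_id = 0
--     for i, cdn in enumerate(consensus, 1):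
--         if i in codons_set:
--             cdn_var = seq_cdn[var_cdn_id]
--             unmasked += cdn_var
--             var_cdn_id += 1
--         else:
--             unmasked += cdn
--     return unmasked
--
-- def msa_unmasking(consensus, codons, msa_dct: Dict[str, str]) -> Dict[str, str]:
--     """
--     Arguments
--     ---------
--     consensus: str
--         root or some seq to gen conservative positions from
--     codons: array
--         codon mask, 1-based
--     aln: List[str]
--         simulated sequences without masked codons
--     """
--     if len(consensus) // 3 < max(codons):
--         raise ValueError("codon mask don't fit to sequence")
--
--     codons_set = set(codons)
--     msa_rebuilt = dict()
--     for node, seq in msa_dct.items():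
--         msa_rebuilt[node] = seq_unmasking(seq, codons_set, consensus)
--     return msa_rebuilt
-- ===== SOURCE B (Python) =====
-- from typing import Dict
--
-- def msa_unmasking(consensus, codons, msa_dct: Dict[str, str]) -> Dict[str, str]:
--     if len(consensus) // 3 < max(codons):
--         raise ValueError("codon mask don't fit to sequence")
--
--     positions = sorted(p for p in set(codons) if p >= 1)
--
--     def rebuild(seq):
--         # stitch: consensus segments between masked codons, with the k-th
--         # variable codon of seq spliced in at the k-th masked position
--         parts = []
--         prev = 0
--         for k, p in enumerate(positions):
--             parts.append(consensus[prev:3 * (p - 1)])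
--             parts.append(seq[3 * k:3 * k + 3])
--             prev = 3 * p
--         parts.append(consensus[prev:])
--         return ''.join(parts)
--
--     return {node: rebuild(seq) for node, seq in msa_dct.items()}
-- ===== Notes on version B (the rewrite author's own statement) =====
-- stated objective: alternative
-- what changed: B never codonifies the consensus or scans it codon-by-codon: it sorts the distinct positive mask positions once and rebuilds each sequence by stitching string slices - the untouched consensus segment up to each masked codon, then the k-th 3-char slice of the sequence - joining the segments, instead of A's per-sequence full-length enumerate over every consensus codon with a set-membership branch and a running counter.
import Mathlib
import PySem

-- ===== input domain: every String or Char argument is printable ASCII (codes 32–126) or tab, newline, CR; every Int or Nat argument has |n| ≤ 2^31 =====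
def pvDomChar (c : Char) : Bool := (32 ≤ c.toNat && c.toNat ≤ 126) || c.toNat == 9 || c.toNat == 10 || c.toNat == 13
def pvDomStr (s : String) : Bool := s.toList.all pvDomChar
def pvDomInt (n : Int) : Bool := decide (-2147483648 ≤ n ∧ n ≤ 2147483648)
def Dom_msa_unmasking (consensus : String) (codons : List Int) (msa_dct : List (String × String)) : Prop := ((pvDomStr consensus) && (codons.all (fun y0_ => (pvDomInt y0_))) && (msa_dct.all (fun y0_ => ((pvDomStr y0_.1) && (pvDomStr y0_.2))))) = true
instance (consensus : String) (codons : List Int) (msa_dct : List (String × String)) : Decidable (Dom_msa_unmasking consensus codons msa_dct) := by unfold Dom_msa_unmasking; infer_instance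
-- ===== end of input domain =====

-- B rebuilds each sequence by stitching string slices — the consensus segment up to each masked
-- codon, then the k-th 3-char slice of the sequence — over the sorted positive mask positions,
-- instead of A's codonify + full scan with a membership branch (objective: alternative, same cost).

-- ===== PORT A =====
-- codonify(seq): append seq[i:i+3] for i in range(0, len(seq), 3)
def pvCodonifyA (s : List Char) : List (List Char) :=
  (PySem.List.pyRange 0 (s.length : Int) 3).foldl
    (fun codons i => codons ++ [PySem.List.slice s (some i) (some (i + 3))]) []

-- seq_unmasking(seq, codons, consensus); none = ValueError / IndexError
def pvSeqUnmaskA (seq : List Char) (codons : List Int) (consensus : List Char) : Option (List Char) :=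
  match PySem.List.max? codons (fun x => x) with
  | none => none
  | some m =>
    if PySem.Int.floordiv (consensus.length : Int) 3 < m then none
    else
      let seq_cdn := pvCodonifyA seq
      let cons_cdns := pvCodonifyA consensus
      let cset := PySem.Set.ofList codons
      ((PySem.List.enumerate cons_cdns 1).foldl
        (fun st p =>
          st.bind (fun uv =>
            if cset.contains p.1 then
              (seq_cdn[uv.2]?).map (fun cv => (uv.1 ++ cv, uv.2 + 1))
            else some (uv.1 ++ p.2, uv.2)))
        (some (([] : List Char), (0 : Nat)))).map (fun uv => uv.1)

def msa_unmasking (consensus : String) (codons : List Int) (msa_dct : List (String × String)) : List (String × String) :=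
  match PySem.List.max? codons (fun x => x) with
  | none => []          -- ValueError from max([]) : excluded by Pre_
  | some m =>
    if PySem.Int.floordiv (consensus.toList.length : Int) 3 < m then []   -- ValueError : excluded by Pre_
    else
      let cset := PySem.Set.ofList codons
      match msa_dct.foldl
          (fun st p => st.bind (fun d =>
            (pvSeqUnmaskA p.2.toList cset consensus.toList).map
              (fun u => PySem.Dict.insert d p.1 (String.ofList u))))
          (some (PySem.Dict.empty : PySem.Dict String String)) with
      | none => []      -- IndexError inside seq_unmasking : excluded by Pre_
      | some d => d.items

-- ===== PORT B =====
-- one iteration of rebuild's loop: append the untouched consensus segment, then seq[3k:3k+3]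
def pvStitchStep (consensus seq : List Char) (st : List (List Char) × Int) (kp : Int × Int) :
    List (List Char) × Int :=
  (st.1 ++ [PySem.List.slice consensus (some st.2) (some (3 * (kp.2 - 1)))]
        ++ [PySem.List.slice seq (some (3 * kp.1)) (some (3 * kp.1 + 3))],
   3 * kp.2)

-- rebuild(seq): stitch segments, then ''.join(parts)
def pvRebuildB (positions : List Int) (consensus seq : List Char) : List Char :=
  let r := (PySem.List.enumerate positions 0).foldl (pvStitchStep consensus seq)
    (([] : List (List Char)), (0 : Int))
  PySem.Chars.join [] (r.1 ++ [PySem.List.slice consensus (some r.2) none])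

def msa_unmasking_alt (consensus : String) (codons : List Int) (msa_dct : List (String × String)) : List (String × String) :=
  match PySem.List.max? codons (fun x => x) with
  | none => []
  | some m =>
    if PySem.Int.floordiv (consensus.toList.length : Int) 3 < m then []
    else
      let positions :=
        PySem.List.sorted ((PySem.Set.ofList codons).filter (fun p => decide (1 ≤ p))) (fun x => x)
      (msa_dct.foldl
        (fun d p => PySem.Dict.insert d p.1
          (String.ofList (pvRebuildB positions consensus.toList p.2.toList)))
        (PySem.Dict.empty : PySem.Dict String String)).items

-- ===== PRECONDITION & SPEC =====
-- Pre_ excludes exactly the inputs where A raises: ValueError when codons is empty or some codon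
-- exceeds len(consensus)//3, and IndexError when a sequence has fewer codons than there are
-- distinct positive mask positions.
def Pre_msa_unmasking (consensus : String) (codons : List Int) (msa_dct : List (String × String)) : Prop :=
  codons ≠ [] ∧
  (∀ c ∈ codons, c ≤ PySem.Int.floordiv (consensus.toList.length : Int) 3) ∧
  (∀ p ∈ msa_dct,
    ((PySem.Set.ofList codons).filter (fun x => decide (1 ≤ x))).length ≤ (p.2.toList.length + 2) / 3)

instance (consensus : String) (codons : List Int) (msa_dct : List (String × String)) : Decidable (Pre_msa_unmasking consensus codons msa_dct) := by unfold Pre_msa_unmasking; infer_instance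

def pvWitness_msa_unmasking : String × List Int × (List (String × String)) :=
  ("ACGACG", [2, 1], [("n1", "TTTGGG"), ("n2", "AAACCC")])

def Spec_msa_unmasking (consensus : String) (codons : List Int) (msa_dct : List (String × String)) (out : List (String × String)) : Prop := out = msa_unmasking_alt consensus codons msa_dct
instance (consensus : String) (codons : List Int) (msa_dct : List (String × String)) (out : List (String × String)) : Decidable (Spec_msa_unmasking consensus codons msa_dct out) := by unfold Spec_msa_unmasking; infer_instance

-- ===== CLAIM (what is proved, stated in full; the proofs are below) =====
def Claim_equal_msa_unmasking : Prop := ∀ (consensus : String) (codons : List Int) (msa_dct : List (String × String)), Dom_msa_unmasking consensus codons msa_dct → Pre_msa_unmasking consensus codons msa_dct → Spec_msa_unmasking consensus codons msa_dct (msa_unmasking consensus codons msa_dct)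


-- ===== LEMMAS AND PROOFS =====

-- 3-char chunks of a char list, index form: chunk i = s[3i:3i+3]
def pvChunks (s : List Char) : List (List Char) :=
  (List.range ((s.length + 2) / 3)).map (fun i => (s.drop (3 * i)).take 3)

theorem pvChunks_nil : pvChunks [] = [] := rfl

theorem pvChunks_cons (s : List Char) (h : s ≠ []) :
    pvChunks s = s.take 3 :: pvChunks (s.drop 3) := by
  unfold pvChunks
  have hn : 0 < s.length := List.length_pos_iff.mpr h
  have hlen : (s.length + 2) / 3 = ((s.drop 3).length + 2) / 3 + 1 := by
    rw [List.length_drop]; omega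
  rw [hlen, List.range_succ_eq_map, List.map_cons, List.map_map]
  simp only [Nat.mul_zero, List.drop_zero]
  congr 1
  apply List.map_congr_left
  intro i _
  simp only [Function.comp_apply, List.drop_drop]
  congr 2
  omega

theorem pvChunks_length (s : List Char) : (pvChunks s).length = (s.length + 2) / 3 := by
  simp [pvChunks]

theorem pvChunks_getD (k : Nat) (s : List Char) :
    (pvChunks s).getD k [] = (s.drop (3 * k)).take 3 := by
  induction k generalizing s with
  | zero =>
    by_cases h : s = []
    · subst h; rfl
    · rw [pvChunks_cons s h]; simp
  | succ k ih =>
    by_cases h : s = []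
    · subst h; rfl
    · rw [pvChunks_cons s h, List.getD_cons_succ, ih, List.drop_drop]
      congr 2
      omega

theorem pvChunks_flatten_take (b : Nat) (s : List Char) :
    ((pvChunks s).take b).flatten = s.take (3 * b) := by
  induction b generalizing s with
  | zero => simp
  | succ b ih =>
    by_cases h : s = []
    · subst h; simp [pvChunks_nil]
    · rw [pvChunks_cons s h, List.take_succ_cons, List.flatten_cons, ih,
        show 3 * (b + 1) = 3 + 3 * b by ring, List.take_add]

theorem pvChunks_flatten (s : List Char) : (pvChunks s).flatten = s := by
  have h1 := pvChunks_flatten_take s.length s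
  rw [List.take_of_length_le (by rw [pvChunks_length]; omega),
    List.take_of_length_le (by omega)] at h1
  exact h1

theorem pvChunks_drop (a : Nat) (s : List Char) :
    (pvChunks s).drop a = pvChunks (s.drop (3 * a)) := by
  induction a generalizing s with
  | zero => simp
  | succ a ih =>
    by_cases h : s = []
    · subst h; simp [pvChunks_nil]
    · rw [pvChunks_cons s h, List.drop_succ_cons, ih, List.drop_drop]
      congr 2
      omega

theorem pvCodonifyA_eq_chunks (s : List Char) : pvCodonifyA s = pvChunks s := by
  unfold pvCodonifyA pvChunks
  rw [PySem.List.foldl_append_singleton_eq_map]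
  rw [PySem.List.pyRange_of_pos 0 (s.length : Int) (by norm_num : (0:Int) < 3)]
  rw [List.map_map, List.nil_append]
  have hM : (if (0:Int) < (s.length : Int) then (((s.length : Int) - 0 + 3 - 1) / 3).toNat else 0)
      = (s.length + 2) / 3 := by
    split_ifs with h
    · omega
    · omega
  rw [hM]
  apply List.map_congr_left
  intro i _
  simp only [Function.comp_apply]
  have h1 : (0 : Int) + 3 * (i : Int) = ((3 * i : Nat) : Int) := by push_cast; ring
  rw [h1]
  rw [show ((3 * i : Nat) : Int) + 3 = ((3 * i : Nat) : Int) + ((3 : Nat) : Int) by norm_num]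
  exact PySem.List.slice_natCast_add s (3 * i) 3

-- the common shape of one rebuilt sequence, codon by codon, 1-based from i0
def pvPieces (ps : List Int) (q : List (List Char)) (cds : List (List Char)) (i0 : Int) :
    List (List Char) :=
  match cds with
  | [] => []
  | c :: cs =>
    (if i0 ∈ ps then q.getD (ps.countP (fun p => decide (p < i0))) [] else c) ::
      pvPieces ps q cs (i0 + 1)

theorem pvPieces_nil (q : List (List Char)) (cds : List (List Char)) (i0 : Int) :
    pvPieces [] q cds i0 = cds := by
  induction cds generalizing i0 with
  | nil => rfl
  | cons c cs ih => simp [pvPieces, ih]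

theorem pvCountP_split (ps : List Int) (i0 : Int) :
    ps.countP (fun p => decide (p < i0 + 1)) =
      ps.countP (fun p => decide (p < i0)) + ps.count i0 := by
  induction ps with
  | nil => simp
  | cons p t ih =>
    simp only [List.countP_cons, List.count_cons, ih, beq_iff_eq, decide_eq_true_eq]
    split_ifs <;> omega

-- A's scan from index i0 with counter countP(<i0) produces u0 ++ flatten of the pieces
theorem pvLoopA_eq (cset : PySem.Set Int) (ps : List Int) (q : List (List Char))
    (hmem : ∀ i : Int, 1 ≤ i → (PySem.Set.contains cset i = true ↔ i ∈ ps))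
    (hnd : ps.Nodup) (hq : ps.length ≤ q.length) :
    ∀ (cds : List (List Char)) (i0 : Int) (u0 : List Char), 1 ≤ i0 →
    (PySem.List.enumerate cds i0).foldl
        (fun st p =>
          st.bind (fun uv =>
            if PySem.Set.contains cset p.1 then
              (q[uv.2]?).map (fun cv => (uv.1 ++ cv, uv.2 + 1))
            else some (uv.1 ++ p.2, uv.2)))
        (some (u0, ps.countP (fun p => decide (p < i0)))) =
      some (u0 ++ (pvPieces ps q cds i0).flatten,
            ps.countP (fun p => decide (p < i0 + cds.length))) := by
  intro cds
  induction cds with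
  | nil =>
    intro i0 u0 _
    simp [PySem.List.enumerate, pvPieces]
  | cons c cs ih =>
    intro i0 u0 hi
    rw [PySem.List.enumerate_cons]
    simp only [List.foldl_cons, Option.bind_some]
    by_cases hmemb : i0 ∈ ps
    · have hc : PySem.Set.contains cset i0 = true := (hmem i0 hi).mpr hmemb
      have hvlt : ps.countP (fun p => decide (p < i0)) < ps.length := by
        refine lt_of_le_of_ne List.countP_le_length ?_
        intro heq
        have := (List.countP_eq_length (l := ps)).mp heq i0 hmemb
        simp at this
      have hvq : ps.countP (fun p => decide (p < i0)) < q.length := lt_of_lt_of_le hvlt hq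
      have hget : q[ps.countP (fun p => decide (p < i0))]? =
          some (q.getD (ps.countP (fun p => decide (p < i0))) []) := by
        rw [List.getD_eq_getElem?_getD]
        rw [List.getElem?_eq_getElem hvq]
        simp
      have hcount : ps.countP (fun p => decide (p < i0)) + 1 =
          ps.countP (fun p => decide (p < i0 + 1)) := by
        rw [pvCountP_split]
        rw [List.count_eq_one_of_mem hnd hmemb]
      simp only [hc, if_pos, hget, Option.map_some]
      rw [hcount]
      rw [ih (i0 + 1) _ (by omega)]
      simp only [pvPieces, if_pos hmemb, List.flatten_cons, List.length_cons]
      rw [List.append_assoc]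
      congr 2
      push_cast
      ring_nf
    · have hc : PySem.Set.contains cset i0 = false := by
        by_cases h : PySem.Set.contains cset i0 = true
        · exact absurd ((hmem i0 hi).mp h) hmemb
        · simpa using h
      have hcount : ps.countP (fun p => decide (p < i0)) =
          ps.countP (fun p => decide (p < i0 + 1)) := by
        rw [pvCountP_split, List.count_eq_zero_of_not_mem hmemb]
        omega
      simp only [hc, Bool.false_eq_true, if_false]
      rw [hcount, ih (i0 + 1) _ (by omega)]
      simp only [pvPieces, if_neg hmemb, List.flatten_cons, List.length_cons]
      rw [List.append_assoc]
      congr 2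
      push_cast
      ring_nf

-- a head position strictly below the running index contributes only a q-shift
theorem pvPieces_head_lt (p : Int) (t : List Int) (q : List (List Char)) :
    ∀ (cds : List (List Char)) (i0 : Int), p < i0 →
    pvPieces (p :: t) q cds i0 = pvPieces t (q.drop 1) cds i0 := by
  intro cds
  induction cds with
  | nil => intro i0 _; rfl
  | cons c cs ih =>
    intro i0 hlt
    simp only [pvPieces]
    rw [ih (i0 + 1) (by omega)]
    congr 1
    have hne : ¬ i0 = p := by omega
    by_cases hmem : i0 ∈ t
    · have : i0 ∈ p :: t := List.mem_cons_of_mem _ hmem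
      simp only [this, hmem, if_pos]
      rw [List.countP_cons, if_pos (by simpa using hlt)]
      rw [List.getD_eq_getElem?_getD, List.getD_eq_getElem?_getD, List.getElem?_drop,
        Nat.add_comm 1 (List.countP (fun r => decide (r < i0)) t)]
    · have : i0 ∉ p :: t := by simp [hne, hmem]
      simp [this, hmem]

-- splitting pvPieces at the minimal masked position
theorem pvPieces_split (p : Int) (t : List Int) (hpt : ∀ r ∈ t, p < r) :
    ∀ (cds : List (List Char)) (q : List (List Char)) (i0 : Int),
      i0 ≤ p → (p - i0).toNat < cds.length →
    pvPieces (p :: t) q cds i0 =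
      cds.take (p - i0).toNat ++
        q.getD 0 [] :: pvPieces t (q.drop 1) (cds.drop ((p - i0).toNat + 1)) (p + 1) := by
  intro cds
  induction cds with
  | nil => intro q i0 _ hlt; simp at hlt
  | cons c cs ih =>
    intro q i0 hle hlt
    by_cases heq : i0 = p
    · subst heq
      rw [show (i0 - i0).toNat = 0 by omega]
      simp only [List.take_zero, List.nil_append, List.drop_succ_cons, List.drop_zero]
      have hnt : i0 ∉ t := fun h => lt_irrefl i0 (hpt i0 h)
      have hcnt : List.countP (fun r => decide (r < i0)) (i0 :: t) = 0 := by
        apply List.countP_eq_zero.mpr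
        intro r hr
        rcases List.mem_cons.mp hr with h | h
        · simp [h]
        · have := hpt r h; simp; omega
      simp only [pvPieces, if_pos (show i0 ∈ i0 :: t from List.mem_cons_self ..), hcnt]
      rw [pvPieces_head_lt i0 t q cs (i0 + 1) (by omega)]
    · have hlt' : i0 < p := by omega
      have hn : (p - i0).toNat = (p - (i0 + 1)).toNat + 1 := by omega
      rw [hn]
      simp only [List.take_succ_cons, List.drop_succ_cons, List.cons_append]
      have h1 : i0 ∉ p :: t := by
        simp only [List.mem_cons]
        push Not
        exact ⟨by omega, fun h => absurd (hpt i0 h) (by omega)⟩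
      simp only [pvPieces, if_neg h1]
      rw [ih q (i0 + 1) (by omega) (by simpa [hn] using hlt)]

-- B's stitch fold, characterised: flatten of parts plus the unconsumed consensus tail
theorem pvStitch (consensus seq : List Char) :
    ∀ (ps : List Int), ps.Pairwise (· < ·) →
    ∀ (a k : Nat) (parts : List (List Char)),
    (∀ p ∈ ps, (a : Int) + 1 ≤ p ∧ p ≤ ((consensus.length / 3 : Nat) : Int)) →
    ∃ (acc : List (List Char)) (e : Nat),
      (PySem.List.enumerate ps (k : Int)).foldl (pvStitchStep consensus seq)
          (parts, ((3 * a : Nat) : Int)) = (acc, ((e : Nat) : Int)) ∧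
      acc.flatten ++ consensus.drop e =
        parts.flatten ++
          (pvPieces ps ((pvChunks seq).drop k) ((pvChunks consensus).drop a)
            ((a : Int) + 1)).flatten := by
  intro ps
  induction ps with
  | nil =>
    intro _ a k parts _
    refine ⟨parts, 3 * a, ?_, ?_⟩
    · simp [PySem.List.enumerate]
    · rw [pvPieces_nil, pvChunks_drop, pvChunks_flatten]
  | cons p t ih =>
    intro hpw a k parts hp
    have hpa : (a : Int) + 1 ≤ p := (hp p (List.mem_cons_self ..)).1
    have hple : p ≤ ((consensus.length / 3 : Nat) : Int) := (hp p (List.mem_cons_self ..)).2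
    set pn := p.toNat with hpn
    have hppn : p = (pn : Int) := by omega
    have hpna : a + 1 ≤ pn := by omega
    have hpnle : pn ≤ consensus.length / 3 := by omega
    rw [PySem.List.enumerate_cons, List.foldl_cons]
    have hstep : pvStitchStep consensus seq (parts, ((3 * a : Nat) : Int)) ((k : Int), p) =
        (parts ++ [PySem.List.slice consensus (some ((3 * a : Nat) : Int)) (some (3 * (p - 1)))]
               ++ [PySem.List.slice seq (some (3 * (k : Int))) (some (3 * (k : Int) + 3))],
         ((3 * pn : Nat) : Int)) := by
      unfold pvStitchStep
      simp only
      congr 1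
      rw [hppn]; push_cast; ring
    rw [hstep]
    have hcast : (k : Int) + 1 = ((k + 1 : Nat) : Int) := by push_cast; ring
    rw [hcast]
    obtain ⟨acc, e, heq, hflat⟩ := ih (List.pairwise_cons.mp hpw).2 pn (k + 1)
      (parts ++ [PySem.List.slice consensus (some ((3 * a : Nat) : Int)) (some (3 * (p - 1)))]
             ++ [PySem.List.slice seq (some (3 * (k : Int))) (some (3 * (k : Int) + 3))])
      (fun r hr => ⟨by have := (List.pairwise_cons.mp hpw).1 r hr; omega,
                    (hp r (List.mem_cons_of_mem _ hr)).2⟩)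
    refine ⟨acc, e, heq, ?_⟩
    rw [hflat]
    -- identify the two slices
    set n := pn - 1 - a with hn
    have hsliceC : PySem.List.slice consensus (some ((3 * a : Nat) : Int)) (some (3 * (p - 1)))
        = (consensus.drop (3 * a)).take (3 * n) := by
      have h1 : 3 * (p - 1) = ((3 * a : Nat) : Int) + ((3 * n : Nat) : Int) := by
        rw [hppn]; push_cast; omega
      rw [h1, PySem.List.slice_natCast_add]
    have hsliceS : PySem.List.slice seq (some (3 * (k : Int))) (some (3 * (k : Int) + 3))
        = (seq.drop (3 * k)).take 3 := by
      have h1 : 3 * (k : Int) = ((3 * k : Nat) : Int) := by push_cast; ring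
      rw [h1]
      rw [show ((3 * k : Nat) : Int) + 3 = ((3 * k : Nat) : Int) + ((3 : Nat) : Int) by norm_num]
      exact PySem.List.slice_natCast_add seq (3 * k) 3
    -- split the pieces at p
    have hlen : (p - ((a : Int) + 1)).toNat < ((pvChunks consensus).drop a).length := by
      rw [List.length_drop, pvChunks_length]
      omega
    rw [pvPieces_split p t (List.pairwise_cons.mp hpw).1 ((pvChunks consensus).drop a)
      ((pvChunks seq).drop k) ((a : Int) + 1) (by omega) hlen]
    have hnn : (p - ((a : Int) + 1)).toNat = n := by omega
    rw [hnn]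
    have htake : (((pvChunks consensus).drop a).take n).flatten
        = (consensus.drop (3 * a)).take (3 * n) := by
      rw [pvChunks_drop, pvChunks_flatten_take]
    have hgetD : ((pvChunks seq).drop k).getD 0 [] = (seq.drop (3 * k)).take 3 := by
      rw [List.getD_eq_getElem?_getD, List.getElem?_drop, Nat.add_zero,
        ← List.getD_eq_getElem?_getD, pvChunks_getD]
    have hdropC : ((pvChunks consensus).drop a).drop (n + 1) = (pvChunks consensus).drop pn := by
      rw [List.drop_drop]
      congr 1
      omega
    have hdropQ : ((pvChunks seq).drop k).drop 1 = (pvChunks seq).drop (k + 1) := by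
      rw [List.drop_drop]
    have hp1 : p + 1 = ((pn : Nat) : Int) + 1 := by omega
    simp only [List.flatten_append, List.flatten_cons, List.flatten_nil,
      List.append_nil, List.append_assoc, hsliceC, hsliceS, htake, hgetD, hdropC, hdropQ, hp1]

theorem pvJoin_nil_eq_flatten (L : List (List Char)) : PySem.Chars.join [] L = L.flatten := by
  induction L with
  | nil => rfl
  | cons x t ih =>
    cases t with
    | nil => simp [PySem.Chars.join, List.intercalate]
    | cons y s =>
      rw [PySem.Chars.join_cons_cons]
      simp only [List.flatten_cons]
      rw [ih]
      simp

-- one sequence: A's seq_unmasking returns B's stitched rebuild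
theorem pvRebuild_eq (consensus : String) (codons : List Int) (seq : String)
    (hne : codons ≠ [])
    (hub : ∀ c ∈ codons, c ≤ PySem.Int.floordiv (consensus.toList.length : Int) 3)
    (hfit : ((PySem.Set.ofList codons).filter (fun x => decide (1 ≤ x))).length ≤
      (seq.toList.length + 2) / 3) :
    pvSeqUnmaskA seq.toList (PySem.Set.ofList codons) consensus.toList =
      some (pvRebuildB
        (PySem.List.sorted ((PySem.Set.ofList codons).filter (fun p => decide (1 ≤ p))) (fun x => x))
        consensus.toList seq.toList) := by
  set ps := PySem.List.sorted ((PySem.Set.ofList codons).filter (fun p => decide (1 ≤ p)))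
    (fun x => x) with hps
  have hfd3 : PySem.Int.floordiv (consensus.toList.length : Int) 3
      = ((consensus.toList.length / 3 : Nat) : Int) := by
    exact_mod_cast PySem.Int.floordiv_natCast consensus.toList.length 3
  -- facts about ps
  have hmem_ps : ∀ i : Int, i ∈ ps ↔ i ∈ codons ∧ 1 ≤ i := by
    intro i
    rw [hps, PySem.List.mem_sorted, List.mem_filter, PySem.Set.mem_ofList]
    simp
  have hnd_ps : ps.Nodup := by
    have h1 : ((PySem.Set.ofList codons).filter (fun p => decide (1 ≤ p))).Nodup :=
      (PySem.Set.nodup_ofList codons).filter _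
    exact ((PySem.List.sorted_perm _ _ _).nodup_iff).mpr h1
  have hpw_ps : ps.Pairwise (· < ·) := by
    have hle := PySem.List.sorted_pairwise
      ((PySem.Set.ofList codons).filter (fun p => decide (1 ≤ p))) (fun x => x)
    have := hle.and hnd_ps
    exact this.imp (fun h => lt_of_le_of_ne h.1 h.2)
  have hlen_ps : ps.length = ((PySem.Set.ofList codons).filter (fun x => decide (1 ≤ x))).length :=
    (PySem.List.sorted_perm _ _ _).length_eq
  have hq_len : ps.length ≤ (pvCodonifyA seq.toList).length := by
    rw [pvCodonifyA_eq_chunks, pvChunks_length, hlen_ps]; exact hfit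
  -- resolve the inner ValueError guard
  have hcne : PySem.Set.ofList codons ≠ [] := by
    rcases List.exists_mem_of_ne_nil codons hne with ⟨x, hx⟩
    intro h
    have := (PySem.Set.mem_ofList codons x).mpr hx
    rw [h] at this
    simp at this
  obtain ⟨m, hm⟩ : ∃ m, PySem.List.max? (PySem.Set.ofList codons) (fun x => x) = some m := by
    cases h : PySem.List.max? (PySem.Set.ofList codons) (fun x => x) with
    | none => exact absurd ((PySem.List.max?_eq_none_iff _ _).mp h) hcne
    | some m => exact ⟨m, rfl⟩
  have hm_codons : m ∈ codons := (PySem.Set.mem_ofList codons m).mp (PySem.List.max?_mem hm)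
  have hguard : ¬ PySem.Int.floordiv (consensus.toList.length : Int) 3 < m :=
    not_lt.mpr (hub m hm_codons)
  rw [pvSeqUnmaskA]
  rw [hm]
  simp only [hguard, if_neg, not_false_iff]
  -- A's loop
  have hmemA : ∀ i : Int, 1 ≤ i →
      ((PySem.Set.ofList (PySem.Set.ofList codons)).contains i = true ↔ i ∈ ps) := by
    intro i hi
    rw [hmem_ps]
    constructor
    · intro h
      have : i ∈ PySem.Set.ofList (PySem.Set.ofList codons) := by
        simpa using h
      rw [PySem.Set.mem_ofList, PySem.Set.mem_ofList] at this
      exact ⟨this, hi⟩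
    · intro ⟨h, _⟩
      have : i ∈ PySem.Set.ofList (PySem.Set.ofList codons) := by
        rw [PySem.Set.mem_ofList, PySem.Set.mem_ofList]; exact h
      simpa using this
  have hzero : (0 : Nat) = ps.countP (fun p => decide (p < 1)) := by
    symm
    apply List.countP_eq_zero.mpr
    intro r hr
    have := (hmem_ps r).mp hr
    simp
    omega
  have hA := pvLoopA_eq (PySem.Set.ofList (PySem.Set.ofList codons)) ps (pvCodonifyA seq.toList)
    hmemA hnd_ps hq_len (pvCodonifyA consensus.toList) 1 [] (le_refl 1)
  rw [← hzero] at hA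
  rw [hA]
  -- B's stitch
  obtain ⟨acc, e, heq, hflat⟩ := pvStitch consensus.toList seq.toList ps hpw_ps 0 0 []
    (by
      intro p hp
      have h1 := (hmem_ps p).mp hp
      refine ⟨by omega, ?_⟩
      have := hub p h1.1
      rw [hfd3] at this
      exact this)
  simp only [pvRebuildB]
  simp only [Nat.mul_zero, Nat.cast_zero, List.drop_zero, zero_add] at heq hflat
  rw [heq]
  simp only [Option.map_some, List.nil_append]
  congr 1
  have hjoin : PySem.Chars.join []
      (acc ++ [PySem.List.slice consensus.toList (some ((e : Nat) : Int)) none])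
      = acc.flatten ++ consensus.toList.drop e := by
    rw [PySem.List.slice_from _ (by positivity), pvJoin_nil_eq_flatten, List.flatten_append]
    simp [Int.toNat_natCast]
  rw [hjoin, hflat]
  rw [pvCodonifyA_eq_chunks, pvCodonifyA_eq_chunks]
  simp

-- ===== VERDICT (by name: the statement is the Claim_ definition above) =====
theorem msa_unmasking_spec : Claim_equal_msa_unmasking := by
  unfold Claim_equal_msa_unmasking
  intro consensus codons msa_dct _ hpre
  obtain ⟨hne, hub, hfit⟩ := hpre
  unfold Spec_msa_unmasking
  obtain ⟨m, hm⟩ : ∃ m, PySem.List.max? codons (fun x => x) = some m := by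
    cases h : PySem.List.max? codons (fun x => x) with
    | none => exact absurd ((PySem.List.max?_eq_none_iff _ _).mp h) hne
    | some m => exact ⟨m, rfl⟩
  have hguard : ¬ PySem.Int.floordiv (consensus.toList.length : Int) 3 < m :=
    not_lt.mpr (hub m (PySem.List.max?_mem hm))
  rw [msa_unmasking, msa_unmasking_alt, hm]
  simp only [hguard, if_neg, not_false_iff]
  have hfold : ∀ (l : List (String × String)), (∀ p ∈ l, p ∈ msa_dct) →
      ∀ (d : PySem.Dict String String),
      l.foldl
        (fun st p => st.bind (fun d =>
          (pvSeqUnmaskA p.2.toList (PySem.Set.ofList codons) consensus.toList).map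
            (fun u => PySem.Dict.insert d p.1 (String.ofList u)))) (some d) =
      some (l.foldl
        (fun d p => PySem.Dict.insert d p.1
          (String.ofList (pvRebuildB
            (PySem.List.sorted ((PySem.Set.ofList codons).filter (fun p => decide (1 ≤ p)))
              (fun x => x))
            consensus.toList p.2.toList))) d) := by
    intro l
    induction l with
    | nil => intro _ d; rfl
    | cons p t ih =>
      intro hsub d
      simp only [List.foldl_cons]
      rw [pvRebuild_eq consensus codons p.2 hne hub (hfit p (hsub p (by simp)))]
      simp only [Option.bind_some, Option.map_some]
      exact ih (fun r hr => hsub r (List.mem_cons_of_mem _ hr)) _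
  rw [hfold msa_dct (fun p hp => hp)]
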